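-- pv_equiv track=rewrite | github.com/dougal428/Daily-Python-Challenges | Challenge 34.py | get_nearest_palindrome
-- ===== SOURCE A (Python) =====
-- def is_palindrome(s):
--     #does reverse = foward
--     return s[::-1] == s
--
-- def get_nearest_palindrome(s):
--     #if palndrom
--     if is_palindrome(s):
--         #return as is
--         return s
--     #if first letter and last letter same
--     if s[0] == s[-1]:
--         #then take those out and add to function of slice
--         return s[0] + get_nearest_palindrome(s[1:-1]) + s[-1]
--     #otherwie
--     else:
--         #create variable where first letter taken out and added to sliced in function
--         pal_1 = s[0] + get_nearest_palindrome(s[1:]) + s[0]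
--         #another viarbale where last letter taken out and added to sliced in function
--         pal_2 = s[-1] + get_nearest_palindrome(s[:-1]) + s[-1]
--
--         #if length pasl2 lesse then pal 1 return pal2
--         if len(pal_1) > len(pal_2):
--             return pal_2
--         #and vice versa
--         elif len(pal_1) < len(pal_2):
--             return pal_1
--         #if length pasl2 lesse then pal 1 return pal2 and vice versa
--         return pal_1 if pal_1 < pal_2 else pal_2
-- ===== SOURCE B (Python) =====
-- def get_nearest_palindrome(s):
--     # Bottom-up DP over substring index pairs (i, j): O(n^2) entries instead of A's exponential recursion.
--     n = len(s)
--     dp = {}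
--     for gap in range(0, n + 1):
--         for i in range(0, n - gap + 1):
--             j = i + gap
--             if gap <= 1:
--                 dp[(i, j)] = s[i:j]
--             elif s[i] == s[j - 1]:
--                 dp[(i, j)] = s[i] + dp[(i + 1, j - 1)] + s[j - 1]
--             else:
--                 p1 = s[i] + dp[(i + 1, j)] + s[i]
--                 p2 = s[j - 1] + dp[(i, j - 1)] + s[j - 1]
--                 dp[(i, j)] = min((p1, p2), key=lambda p: (len(p), p))
--     return dp[(0, n)]
-- ===== Notes on version B (the rewrite author's own statement) =====
-- stated objective: faster
-- what changed: Replaces A's exponential branching recursion (re-solving overlapping substrings and re-checking palindromicity at every call) with a bottom-up dynamic program over the O(n^2) substring index pairs (i, j), filling a dict by increasing gap length with the same (length, lexicographic) tie-break.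
import Mathlib
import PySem

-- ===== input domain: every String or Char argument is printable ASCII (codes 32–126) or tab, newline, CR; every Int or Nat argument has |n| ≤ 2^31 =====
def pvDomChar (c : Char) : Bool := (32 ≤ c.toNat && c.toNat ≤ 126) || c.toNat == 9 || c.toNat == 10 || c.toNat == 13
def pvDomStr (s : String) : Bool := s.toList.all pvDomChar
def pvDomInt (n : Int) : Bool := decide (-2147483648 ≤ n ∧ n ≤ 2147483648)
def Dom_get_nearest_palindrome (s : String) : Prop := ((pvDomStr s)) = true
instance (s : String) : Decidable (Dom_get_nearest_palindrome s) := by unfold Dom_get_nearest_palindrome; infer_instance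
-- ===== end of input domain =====

-- B replaces A's exponential branching recursion by a bottom-up dict DP over substring index pairs (i, j); same return value, O(n^2) cells.

-- ===== PORT A =====
-- is_palindrome(s): s[::-1] == s  (slice with step -1 never raises)
def pvIsPalindrome (l : List Char) : Bool :=
  PySem.List.slice? l none none (-1) == some l

-- termination facts for pvA (cited in decreasing_by): each recursive slice is strictly shorter
theorem pvSliceMidLen (l : List Char) (h : l ≠ []) :
    (PySem.List.slice l (some 1) (some (-1))).length < l.length := by
  rw [show PySem.List.slice l (some 1) (some (-1)) = (l.drop 1).dropLast by
    cases l with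
    | nil => simp [PySem.List.slice]
    | cons a t => simp [PySem.List.slice, List.dropLast_eq_take]]
  have : l.length ≠ 0 := by simpa using h
  simp [List.length_dropLast]; omega

theorem pvSliceTailLen (l : List Char) (h : l ≠ []) :
    (PySem.List.slice l (some 1) none).length < l.length := by
  rw [PySem.List.slice_from_one]
  have : l.length ≠ 0 := by simpa using h
  simp [List.length_tail]; omega

theorem pvSliceInitLen (l : List Char) (h : l ≠ []) :
    (PySem.List.slice l none (some (-1))).length < l.length := by
  rw [PySem.List.slice_to_neg_one]
  have : l.length ≠ 0 := by simpa using h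
  simp [List.length_dropLast]; omega

theorem pvNeNilOfNotPal (l : List Char) (h : ¬ pvIsPalindrome l = true) : l ≠ [] := by
  intro hl; subst hl; exact h (by decide)

-- literal transliteration of A on the code points; s[0]/s[-1] via pyGetD (in range: [] is a palindrome, so l ≠ [] past the first branch)
def pvA (l : List Char) : List Char :=
  if _hp : pvIsPalindrome l then l
  else
    let c := PySem.List.pyGetD l 0 ' '
    let d := PySem.List.pyGetD l (-1) ' '
    if c = d then
      c :: pvA (PySem.List.slice l (some 1) (some (-1))) ++ [d]   -- s[1:-1]
    else
      let p1 := c :: pvA (PySem.List.slice l (some 1) none) ++ [c]   -- s[1:]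
      let p2 := d :: pvA (PySem.List.slice l none (some (-1))) ++ [d]   -- s[:-1]
      if p2.length < p1.length then p2
      else if p1.length < p2.length then p1
      else if PySem.Chars.strLt p1 p2 then p1 else p2
termination_by l.length
decreasing_by
  · exact pvSliceMidLen l (pvNeNilOfNotPal l _hp)
  · exact pvSliceTailLen l (pvNeNilOfNotPal l _hp)
  · exact pvSliceInitLen l (pvNeNilOfNotPal l _hp)

def get_nearest_palindrome (s : String) : String := String.ofList (pvA s.toList)

-- ===== PORT B =====
-- dp cell value for key (i, i+gap): the body of B's inner loop (lookups dp[(...)] always hit; getD [] is the direct index)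
def pvCell (l : List Char) (dp : PySem.Dict (Int × Int) (List Char)) (gap i : Int) : List Char :=
  let j := i + gap
  if gap ≤ 1 then PySem.List.slice l (some i) (some j)   -- s[i:j]
  else if PySem.List.pyGetD l i ' ' = PySem.List.pyGetD l (j - 1) ' ' then
    PySem.List.pyGetD l i ' ' :: dp.getD (i + 1, j - 1) [] ++ [PySem.List.pyGetD l (j - 1) ' ']
  else
    let p1 := PySem.List.pyGetD l i ' ' :: dp.getD (i + 1, j) [] ++ [PySem.List.pyGetD l i ' ']
    let p2 := PySem.List.pyGetD l (j - 1) ' ' :: dp.getD (i, j - 1) [] ++ [PySem.List.pyGetD l (j - 1) ' ']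
    -- min((p1, p2), key=lambda p: (len(p), p)): p2 wins iff its (len, lex) key is strictly smaller
    if p2.length < p1.length ∨ (p2.length = p1.length ∧ PySem.Chars.strLt p2 p1 = true) then p2 else p1

def pvInner (l : List Char) (gap : Int) (dp : PySem.Dict (Int × Int) (List Char)) (i : Int) :
    PySem.Dict (Int × Int) (List Char) :=
  dp.insert (i, i + gap) (pvCell l dp gap i)

def pvB (l : List Char) : PySem.Dict (Int × Int) (List Char) :=
  let n : Int := PySem.List.len l
  (PySem.List.pyRange 0 (n + 1) 1).foldl
    (fun dp gap => (PySem.List.pyRange 0 (n - gap + 1) 1).foldl (pvInner l gap) dp)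
    PySem.Dict.empty

def get_nearest_palindrome_alt (s : String) : String :=
  String.ofList ((pvB s.toList).getD (0, PySem.List.len s.toList) [])   -- dp[(0, n)], always present

-- ===== PRECONDITION & SPEC =====
def Spec_get_nearest_palindrome (s : String) (out : String) : Prop := out = get_nearest_palindrome_alt s
instance (s : String) (out : String) : Decidable (Spec_get_nearest_palindrome s out) := by unfold Spec_get_nearest_palindrome; infer_instance

-- ===== CLAIM (what is proved, stated in full; the proofs are below) =====
def Claim_equal_get_nearest_palindrome : Prop := ∀ (s : String), Dom_get_nearest_palindrome s → Spec_get_nearest_palindrome s (get_nearest_palindrome s)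

-- ===== LEMMAS AND PROOFS =====

theorem pvSliceMid (l : List Char) :
    PySem.List.slice l (some 1) (some (-1)) = (l.drop 1).dropLast := by
  cases l with
  | nil => simp [PySem.List.slice]
  | cons a t => simp [PySem.List.slice, List.dropLast_eq_take]

theorem pvIsPal_iff (l : List Char) : pvIsPalindrome l = true ↔ l.reverse = l := by
  simp [pvIsPalindrome, PySem.List.slice?_none_none_neg_one]

-- the substring s[i:j] on the list side
def pvSub (l : List Char) (i j : Nat) : List Char := (l.drop i).take (j - i)

theorem pvA_pal (l : List Char) (h : l.reverse = l) : pvA l = l := by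
  rw [pvA]
  simp [pvIsPalindrome, PySem.List.slice?_none_none_neg_one, h]

theorem pvA_base (l : List Char) (h : l.length ≤ 1) : pvA l = l := by
  apply pvA_pal
  match l, h with
  | [], _ => rfl
  | [a], _ => rfl

theorem pvPalStruct (a b : Char) (mid : List Char) :
    (a :: mid ++ [b]).reverse = (a :: mid ++ [b]) ↔ (b = a ∧ mid.reverse = mid) := by
  simp; tauto

theorem pvA_match (a : Char) (mid : List Char) :
    pvA (a :: mid ++ [a]) = a :: pvA mid ++ [a] := by
  by_cases hp : (a :: mid ++ [a]).reverse = a :: mid ++ [a]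
  · have hmid : mid.reverse = mid := ((pvPalStruct a a mid).mp hp).2
    rw [pvA_pal _ hp, pvA_pal _ hmid]
  · rw [pvA, dif_neg (by simpa [pvIsPal_iff] using hp)]
    have hc : PySem.List.pyGetD (a :: mid ++ [a]) 0 ' ' = a := PySem.List.pyGetD_zero_cons a _ ' '
    have hd : PySem.List.pyGetD (a :: mid ++ [a]) (-1) ' ' = a := by
      rw [show a :: mid ++ [a] = (a :: mid) ++ [a] by simp]
      exact PySem.List.pyGetD_neg_one_append_singleton _ a ' '
    simp only [hc, hd, pvSliceMid]
    simp

theorem pvA_mismatch (a b : Char) (mid : List Char) (hne : a ≠ b) :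
    pvA (a :: mid ++ [b]) =
      (if (b :: pvA (a :: mid) ++ [b]).length < (a :: pvA (mid ++ [b]) ++ [a]).length then
        b :: pvA (a :: mid) ++ [b]
      else if (a :: pvA (mid ++ [b]) ++ [a]).length < (b :: pvA (a :: mid) ++ [b]).length then
        a :: pvA (mid ++ [b]) ++ [a]
      else if PySem.Chars.strLt (a :: pvA (mid ++ [b]) ++ [a]) (b :: pvA (a :: mid) ++ [b]) then
        a :: pvA (mid ++ [b]) ++ [a]
      else b :: pvA (a :: mid) ++ [b]) := by
  have hp : ¬ (a :: mid ++ [b]).reverse = a :: mid ++ [b] := by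
    rw [pvPalStruct]; rintro ⟨rfl, -⟩; exact hne rfl
  rw [pvA, dif_neg (by simpa [pvIsPal_iff] using hp)]
  have hc : PySem.List.pyGetD (a :: mid ++ [b]) 0 ' ' = a := PySem.List.pyGetD_zero_cons a _ ' '
  have hd : PySem.List.pyGetD (a :: mid ++ [b]) (-1) ' ' = b := by
    rw [show a :: mid ++ [b] = (a :: mid) ++ [b] by simp]
    exact PySem.List.pyGetD_neg_one_append_singleton _ b ' '
  simp only [hc, hd, if_neg hne, PySem.List.slice_from_one, PySem.List.slice_to_neg_one]
  have h1 : (a :: mid ++ [b]).tail = mid ++ [b] := rfl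
  have h2 : (a :: mid ++ [b]).dropLast = a :: mid := by
    exact List.dropLast_concat ..
  simp only [h1, h2]

-- Python's min((p1, p2), key=(len, lex)) agrees with A's three-way comparison
theorem pvMinEqThreeway (p1 p2 : List Char) :
    (if p2.length < p1.length ∨ (p2.length = p1.length ∧ PySem.Chars.strLt p2 p1 = true) then p2 else p1)
      = (if p2.length < p1.length then p2
         else if p1.length < p2.length then p1
         else if PySem.Chars.strLt p1 p2 then p1 else p2) := by
  simp only [PySem.Chars.strLt, decide_eq_true_eq]
  by_cases h1 : p2.length < p1.length
  · simp [h1]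
  · rw [if_neg h1]
    by_cases h2 : p1.length < p2.length
    · rw [if_neg (by rintro (h | ⟨he, -⟩) <;> omega), if_pos h2]
    · rw [if_neg h2]
      have he : p2.length = p1.length := by omega
      by_cases h3 : p1 < p2
      · have : ¬ (p2.length < p1.length ∨ (p2.length = p1.length ∧ p2 < p1)) := by
          rintro (h | ⟨-, hlt⟩)
          · omega
          · exact absurd hlt (lt_asymm h3)
        rw [if_neg this, if_pos h3]
      · rw [if_neg h3]
        by_cases h4 : p2 < p1
        · rw [if_pos (Or.inr ⟨he, h4⟩)]
        · have : ¬ (p2.length < p1.length ∨ (p2.length = p1.length ∧ p2 < p1)) := by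
            rintro (h | ⟨-, hlt⟩)
            · omega
            · exact h4 hlt
          rw [if_neg this]
          exact le_antisymm (not_lt.mp h4) (not_lt.mp h3)

theorem pvSub_cons (l : List Char) (i j : Nat) (h : i < j) (hj : j ≤ l.length) :
    pvSub l i j = l[i]'(by omega) :: pvSub l (i+1) j := by
  unfold pvSub
  rw [show j - i = (j - (i+1)) + 1 by omega]
  rw [List.drop_eq_getElem_cons (by omega), List.take_succ_cons]

theorem pvSub_snoc (l : List Char) (i j : Nat) (h : i < j) (hj : j ≤ l.length) :
    pvSub l i j = pvSub l i (j-1) ++ [l[j-1]'(by omega)] := by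
  unfold pvSub
  rw [show j - i = (j - 1 - i) + 1 by omega, List.take_add_one]
  congr 1
  rw [List.getElem?_drop]
  rw [show i + (j - 1 - i) = j - 1 by omega]
  simp [List.getElem?_eq_getElem (by omega : j - 1 < l.length)]

theorem pvSub_zero_len (l : List Char) : pvSub l 0 l.length = l := by
  simp [pvSub]

theorem pvCore_base (l : List Char) (i g : Nat) (hg : g ≤ 1) :
    pvA (pvSub l i (i+g)) = pvSub l i (i+g) := by
  apply pvA_base
  unfold pvSub
  simp
  omega

theorem pvCore_match (l : List Char) (i g : Nat) (h2 : 2 ≤ g) (hn : i + g ≤ l.length)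
    (he : l[i]'(by omega) = l[i+g-1]'(by omega)) :
    pvA (pvSub l i (i+g)) = l[i]'(by omega) :: pvA (pvSub l (i+1) (i+g-1)) ++ [l[i+g-1]'(by omega)] := by
  have hd : pvSub l i (i+g)
      = l[i]'(by omega) :: (pvSub l (i+1) (i+g-1) ++ [l[i+g-1]'(by omega)]) := by
    rw [pvSub_cons l i (i+g) (by omega) hn, pvSub_snoc l (i+1) (i+g) (by omega) hn]
  rw [hd, ← he]
  rw [show l[i]'(by omega) :: (pvSub l (i+1) (i+g-1) ++ [l[i]'(by omega)])
      = l[i]'(by omega) :: pvSub l (i+1) (i+g-1) ++ [l[i]'(by omega)] by simp]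
  exact pvA_match _ _

theorem pvCore_mismatch (l : List Char) (i g : Nat) (h2 : 2 ≤ g) (hn : i + g ≤ l.length)
    (he : l[i]'(by omega) ≠ l[i+g-1]'(by omega)) :
    pvA (pvSub l i (i+g)) =
      (if (l[i+g-1]'(by omega) :: pvA (pvSub l i (i+g-1)) ++ [l[i+g-1]'(by omega)]).length
            < (l[i]'(by omega) :: pvA (pvSub l (i+1) (i+g)) ++ [l[i]'(by omega)]).length then
        l[i+g-1]'(by omega) :: pvA (pvSub l i (i+g-1)) ++ [l[i+g-1]'(by omega)]
      else if (l[i]'(by omega) :: pvA (pvSub l (i+1) (i+g)) ++ [l[i]'(by omega)]).length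
            < (l[i+g-1]'(by omega) :: pvA (pvSub l i (i+g-1)) ++ [l[i+g-1]'(by omega)]).length then
        l[i]'(by omega) :: pvA (pvSub l (i+1) (i+g)) ++ [l[i]'(by omega)]
      else if PySem.Chars.strLt (l[i]'(by omega) :: pvA (pvSub l (i+1) (i+g)) ++ [l[i]'(by omega)])
                (l[i+g-1]'(by omega) :: pvA (pvSub l i (i+g-1)) ++ [l[i+g-1]'(by omega)]) then
        l[i]'(by omega) :: pvA (pvSub l (i+1) (i+g)) ++ [l[i]'(by omega)]
      else l[i+g-1]'(by omega) :: pvA (pvSub l i (i+g-1)) ++ [l[i+g-1]'(by omega)]) := by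
  have hmid : pvSub l i (i+g)
      = l[i]'(by omega) :: pvSub l (i+1) (i+g-1) ++ [l[i+g-1]'(by omega)] := by
    rw [pvSub_cons l i (i+g) (by omega) hn, pvSub_snoc l (i+1) (i+g) (by omega) hn]
    simp
  have htail : pvSub l (i+1) (i+g) = pvSub l (i+1) (i+g-1) ++ [l[i+g-1]'(by omega)] :=
    pvSub_snoc l (i+1) (i+g) (by omega) hn
  have hinit : pvSub l i (i+g-1) = l[i]'(by omega) :: pvSub l (i+1) (i+g-1) :=
    pvSub_cons l i (i+g-1) (by omega) (by omega)
  rw [hmid, htail, hinit]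
  exact pvA_mismatch _ _ _ he

-- dict invariant: dp holds exactly the cells (i, j) with 0 ≤ i ≤ j ≤ n and P i j, each mapped to A's value on s[i:j]
def pvGood (l : List Char) (dp : PySem.Dict (Int × Int) (List Char)) (P : Int → Int → Prop) : Prop :=
  ∀ i j : Int,
    ((0 ≤ i ∧ i ≤ j ∧ j ≤ (l.length : Int) ∧ P i j) →
        dp.get? (i, j) = some (pvA (pvSub l i.toNat j.toNat))) ∧
    (¬ (0 ≤ i ∧ i ≤ j ∧ j ≤ (l.length : Int) ∧ P i j) → dp.get? (i, j) = none)

theorem pvGood_congr (l : List Char) (dp : PySem.Dict (Int × Int) (List Char))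
    (P Q : Int → Int → Prop)
    (h : ∀ i j : Int, 0 ≤ i → i ≤ j → j ≤ (l.length : Int) → (P i j ↔ Q i j))
    (hg : pvGood l dp P) : pvGood l dp Q := by
  intro i j
  refine ⟨fun ⟨a, b, c, d⟩ => (hg i j).1 ⟨a, b, c, (h i j a b c).mpr d⟩,
          fun hn => (hg i j).2 (fun ⟨a, b, c, d⟩ => hn ⟨a, b, c, (h i j a b c).mp d⟩)⟩

theorem pvCell_correct (l : List Char) (g m : Nat) (hm : m + g ≤ l.length)
    (dp : PySem.Dict (Int × Int) (List Char))
    (hdp : pvGood l dp (fun i j => j - i < (g : Int) ∨ (j - i = (g : Int) ∧ i < (m : Int)))) :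
    pvCell l dp (g : Int) (m : Int) = pvA (pvSub l m (m + g)) := by
  have hlook : ∀ a b : Nat, a ≤ b → b ≤ l.length → (b - a < g ∨ (b - a = g ∧ a < m)) →
      dp.getD ((a : Int), (b : Int)) [] = pvA (pvSub l a b) := by
    intro a b hab hbn hP
    have hc : (0 : Int) ≤ (a : Int) ∧ (a : Int) ≤ (b : Int) ∧ (b : Int) ≤ (l.length : Int) ∧
        ((b : Int) - (a : Int) < (g : Int) ∨ ((b : Int) - (a : Int) = (g : Int) ∧ (a : Int) < (m : Int))) := by
      rcases hP with h | ⟨h1, h2⟩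
      · refine ⟨by positivity, by exact_mod_cast hab, by exact_mod_cast hbn, Or.inl ?_⟩
        omega
      · refine ⟨by positivity, by exact_mod_cast hab, by exact_mod_cast hbn, Or.inr ⟨?_, ?_⟩⟩
        · omega
        · exact_mod_cast h2
    have hsome := (hdp (a : Int) (b : Int)).1 hc
    rw [PySem.Dict.getD_eq_get?_getD, hsome]
    simp
  simp only [pvCell]
  by_cases hg : g ≤ 1
  · rw [if_pos (by exact_mod_cast hg)]
    rw [show ((m : Int) + (g : Int)) = ((m + g : Nat) : Int) by push_cast; ring]
    rw [PySem.List.slice_natCast, pvCore_base l m g hg]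
    rfl
  · have hg2 : 2 ≤ g := by omega
    rw [if_neg (by exact_mod_cast hg)]
    have e1 : PySem.List.pyGetD l (m : Int) ' ' = l[m]'(by omega) := by
      rw [PySem.List.pyGetD_eq_getElem l ' ' (by positivity) (by exact_mod_cast (by omega : m < l.length))]
      simp
    have e2 : PySem.List.pyGetD l ((m : Int) + (g : Int) - 1) ' ' = l[m+g-1]'(by omega) := by
      rw [show ((m : Int) + (g : Int) - 1) = ((m + g - 1 : Nat) : Int) by omega]
      rw [PySem.List.pyGetD_eq_getElem l ' ' (by positivity) (by exact_mod_cast (by omega : m + g - 1 < l.length))]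
      simp
    rw [e1, e2]
    have k1 : ((m : Int) + 1) = ((m + 1 : Nat) : Int) := by push_cast; ring
    have k2 : ((m : Int) + (g : Int) - 1) = ((m + g - 1 : Nat) : Int) := by omega
    have k3 : ((m : Int) + (g : Int)) = ((m + g : Nat) : Int) := by push_cast; ring
    by_cases hch : l[m]'(by omega) = l[m+g-1]'(by omega)
    · rw [if_pos hch, k1, k2]
      rw [hlook (m+1) (m+g-1) (by omega) (by omega) (Or.inl (by omega))]
      exact (pvCore_match l m g hg2 hm hch).symm
    · rw [if_neg hch, k1, k2, k3]
      rw [hlook (m+1) (m+g) (by omega) (by omega) (Or.inl (by omega))]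
      rw [hlook m (m+g-1) (by omega) (by omega) (Or.inl (by omega))]
      rw [pvMinEqThreeway]
      exact (pvCore_mismatch l m g hg2 hm hch).symm

theorem pvInner_inv (l : List Char) (g : Nat)
    (dp : PySem.Dict (Int × Int) (List Char))
    (hdp : pvGood l dp (fun i j => j - i < (g : Int)))
    (m : Nat) (hm : m + g ≤ l.length + 1) :
    pvGood l (((List.range m).map (fun k : Nat => (k : Int))).foldl (pvInner l (g : Int)) dp)
      (fun i j => j - i < (g : Int) ∨ (j - i = (g : Int) ∧ i < (m : Int))) := by
  induction m with
  | zero =>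
    simp only [List.range_zero, List.map_nil, List.foldl_nil]
    refine pvGood_congr l dp _ _ (fun i j h0 hij hjn => ?_) hdp
    constructor
    · exact Or.inl
    · rintro (h | ⟨-, hi⟩)
      · exact h
      · omega
  | succ m ih =>
    have ih' := ih (by omega)
    rw [List.range_succ, List.map_append, List.foldl_append]
    simp only [List.map_cons, List.map_nil, List.foldl_cons, List.foldl_nil]
    have hv : pvCell l (((List.range m).map (fun k : Nat => (k : Int))).foldl (pvInner l (g : Int)) dp)
        ((g : Nat) : Int) ((m : Nat) : Int) = pvA (pvSub l m (m + g)) :=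
      pvCell_correct l g m (by omega) _ ih'
    intro i j
    simp only [pvInner]
    rw [PySem.Dict.get?_insert]
    by_cases hk : ((i, j) : Int × Int) = ((m : Int), (m : Int) + (g : Int))
    · rw [if_pos hk]
      have hi' : i = (m : Int) := by simpa using congrArg Prod.fst hk
      have hj' : j = (m : Int) + (g : Int) := by simpa using congrArg Prod.snd hk
      constructor
      · intro _
        rw [hv, hi', hj']
        have ht : ((m : Int) + (g : Int)).toNat = m + g := by omega
        simp [ht]
      · intro hn
        exfalso
        apply hn
        refine ⟨by rw [hi']; positivity, by rw [hi', hj']; omega,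
                by rw [hj']; omega, Or.inr ⟨by rw [hi', hj']; ring, by rw [hi']; push_cast; omega⟩⟩
    · rw [if_neg hk]
      constructor
      · rintro ⟨h0, hij, hjn, hP⟩
        apply (ih' i j).1
        refine ⟨h0, hij, hjn, ?_⟩
        rcases hP with h | ⟨hq, hi⟩
        · exact Or.inl h
        · rcases lt_or_eq_of_le (by omega : i ≤ (m : Int)) with h | h
          · exact Or.inr ⟨hq, h⟩
          · exfalso; apply hk; rw [Prod.mk.injEq]; omega
      · intro hn
        apply (ih' i j).2
        rintro ⟨h0, hij, hjn, hP⟩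
        apply hn
        refine ⟨h0, hij, hjn, ?_⟩
        rcases hP with h | ⟨hq, hi⟩
        · exact Or.inl h
        · exact Or.inr ⟨hq, by omega⟩

theorem pvOuter_inv (l : List Char) (G : Nat) (hG : G ≤ l.length + 1) :
    pvGood l (((List.range G).map (fun k : Nat => (k : Int))).foldl
        (fun dp gap => (PySem.List.pyRange 0 ((l.length : Int) - gap + 1) 1).foldl (pvInner l gap) dp)
        PySem.Dict.empty)
      (fun i j => j - i < (G : Int)) := by
  induction G with
  | zero =>
    simp only [List.range_zero, List.map_nil, List.foldl_nil]
    intro i j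
    refine ⟨fun ⟨h0, hij, hjn, hP⟩ => absurd hP (by omega), fun _ => PySem.Dict.get?_empty _⟩
  | succ G ih =>
    have ih' := ih (by omega)
    rw [List.range_succ, List.map_append, List.foldl_append]
    simp only [List.map_cons, List.map_nil, List.foldl_cons, List.foldl_nil]
    have hrange : PySem.List.pyRange 0 ((l.length : Int) - (G : Int) + 1) 1
        = (List.range (l.length - G + 1)).map (fun k : Nat => (k : Int)) := by
      rw [PySem.List.pyRange_one]
      have : (((l.length : Int) - (G : Int) + 1) - 0).toNat = l.length - G + 1 := by omega
      rw [this]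
      simp
    rw [hrange]
    refine pvGood_congr l _ _ _ (fun i j h0 hij hjn => ?_)
      (pvInner_inv l G _ ih' (l.length - G + 1) (by omega))
    constructor
    · rintro (h | ⟨hq, hi⟩)
      · push_cast; omega
      · push_cast; push_cast at hi; omega
    · intro h
      by_cases hlt : j - i < (G : Int)
      · exact Or.inl hlt
      · refine Or.inr ⟨by push_cast at h; omega, ?_⟩
        push_cast at h ⊢; omega

theorem pvB_final (l : List Char) : (pvB l).getD (0, PySem.List.len l) [] = pvA l := by
  simp only [pvB, PySem.List.len_eq]
  have hrange : PySem.List.pyRange 0 ((l.length : Int) + 1) 1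
      = (List.range (l.length + 1)).map (fun k : Nat => (k : Int)) := by
    rw [PySem.List.pyRange_one]
    have : (((l.length : Int) + 1) - 0).toNat = l.length + 1 := by omega
    rw [this]
    simp
  rw [hrange]
  have hout := pvOuter_inv l (l.length + 1) (le_refl _)
  have hsome := (hout 0 (l.length : Int)).1 ⟨le_refl _, by positivity, le_refl _, by push_cast; omega⟩
  rw [PySem.Dict.getD_eq_get?_getD, hsome]
  simp [pvSub_zero_len]

-- ===== VERDICT (by name: the statement is the Claim_ definition above) =====
theorem get_nearest_palindrome_spec : Claim_equal_get_nearest_palindrome := by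
  intro s _
  unfold Spec_get_nearest_palindrome get_nearest_palindrome get_nearest_palindrome_alt
  rw [pvB_final]
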